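-- pv_equiv track=rewrite | github.com/furlat/Abstractions | abstractions/goap/spatial.py | _summarize_positions
-- ===== SOURCE A (Python) =====
-- from typing import List, Tuple, TYPE_CHECKING, Optional, Any, ForwardRef, Dict, Union, Set, Type
--
-- def _summarize_positions(positions: List[Tuple[int, int]]) -> str:
--     if not positions:
--         return ""
--
--     min_x = min(x for x, _ in positions)
--     min_y = min(y for _, y in positions)
--     max_x = max(x for x, _ in positions)
--     max_y = max(y for _, y in positions)
--
--     grid = [[0] * (max_x - min_x + 1) for _ in range(max_y - min_y + 1)]
--     for x, y in positions:
--         grid[y - min_y][x - min_x] = 1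
--
--     def find_largest_rectangle(grid):
--         if not grid or not grid[0]:
--             return 0, 0, 0, 0
--
--         rows = len(grid)
--         cols = len(grid[0])
--         max_area = 0
--         max_rect = (0, 0, 0, 0)
--
--         for i in range(rows):
--             for j in range(cols):
--                 if grid[i][j] == 1:
--                     width = 1
--                     height = 1
--                     while j + width < cols and all(grid[i][j + width] == 1 for i in range(i, rows)):
--                         width += 1
--                     while i + height < rows and all(grid[i + height][j] == 1 for j in range(j, j + width)):
--                         height += 1
--                     area = width * height
--                     if area > max_area:
--                         max_area = area
--                         max_rect = (j, i, width, height)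
--
--         return max_rect
--
--     rectangles = []
--     while any(1 in row for row in grid):
--         x, y, width, height = find_largest_rectangle(grid)
--         rectangles.append((x + min_x, y + min_y, width, height))
--         for i in range(y, y + height):
--             for j in range(x, x + width):
--                 grid[i][j] = 0
--
--     summarized = []
--     for x, y, width, height in rectangles:
--         if width == 1 and height == 1:
--             summarized.append(f"({x}, {y})")
--         elif width == 1:
--             summarized.append(f"({x}, {y}:{y + height})")
--         elif height == 1:
--             summarized.append(f"({x}:{x + width}, {y})")
--         else:
--             summarized.append(f"({x}:{x + width}, {y}:{y + height})")
--
--     remaining_positions = [(x, y) for x, y in positions if not any(x >= rx and x < rx + rw and y >= ry and y < ry + rh for rx, ry, rw, rh in rectangles)]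
--     if remaining_positions:
--         summarized.extend(f"({x}, {y})" for x, y in remaining_positions)
--
--     return ", ".join(summarized)
-- ===== SOURCE B (Python) =====
-- def _summarize_positions(positions):
--     if not positions:
--         return ""
--
--     x0, y0 = positions[0]
--     lo_x = hi_x = x0
--     lo_y = hi_y = y0
--     for x, y in positions[1:]:
--         if x < lo_x:
--             lo_x = x
--         if x > hi_x:
--             hi_x = x
--         if y < lo_y:
--             lo_y = y
--         if y > hi_y:
--             hi_y = y
--
--     rows = hi_y - lo_y + 1
--     cols = hi_x - lo_x + 1
--     occ = {(x - lo_x, y - lo_y) for x, y in positions}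
--
--     def col_prefix(j):
--         acc = [0]
--         for r in range(rows):
--             acc.append(acc[-1] + ((j, r) in occ))
--         return acc
--
--     def row_prefix(i):
--         acc = [0]
--         for c in range(cols):
--             acc.append(acc[-1] + ((c, i) in occ))
--         return acc
--
--     def find_largest_rectangle():
--         # prefix-sum tables only for the non-empty columns / rows
--         cp = {j: col_prefix(j) for j in sorted({x for x, _ in occ})}
--         rp = {i: row_prefix(i) for i in sorted({y for _, y in occ})}
--         best_area = 0
--         best = (0, 0, 0, 0)
--         # candidates = occupied cells in row-major order
--         for j, i in sorted(occ, key=lambda p: (p[1], p[0])):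
--             width = 1
--             while j + width < cols and j + width in cp and cp[j + width][rows] - cp[j + width][i] == rows - i:
--                 width += 1
--             height = 1
--             while i + height < rows and i + height in rp and rp[i + height][j + width] - rp[i + height][j] == width:
--                 height += 1
--             area = width * height
--             if area > best_area:
--                 best_area = area
--                 best = (j, i, width, height)
--         return best
--
--     def span(a, n):
--         return str(a) if n == 1 else f"{a}:{a + n}"
--
--     rects = []
--     parts = []
--     while occ:
--         j, i, w, h = find_largest_rectangle()
--         rects.append((j + lo_x, i + lo_y, w, h))
--         parts.append(f"({span(j + lo_x, w)}, {span(i + lo_y, h)})")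
--         occ.difference_update((c, r) for r in range(i, i + h) for c in range(j, j + w))
--
--     parts.extend(
--         f"({x}, {y})"
--         for x, y in positions
--         if all(not (rx <= x < rx + rw and ry <= y < ry + rh) for rx, ry, rw, rh in rects)
--     )
--     return ", ".join(parts)
-- ===== Notes on version B (the rewrite author's own statement) =====
-- stated objective: alternative
-- what changed: B drops A's 0/1 grid and its row-major rescans: the bounding box comes from one fold over the positions, occupied cells live in a set whose greedy find iterates sorted(occ) with prefix-sum range-count tables (dicts keyed by the non-empty columns/rows) replacing A's all-ones column/row scans, each rectangle is formatted as it is found via a span helper instead of A's four-branch formatter pass, and leftovers are kept by an all-not-inside test instead of not-any-inside.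
import Mathlib
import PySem

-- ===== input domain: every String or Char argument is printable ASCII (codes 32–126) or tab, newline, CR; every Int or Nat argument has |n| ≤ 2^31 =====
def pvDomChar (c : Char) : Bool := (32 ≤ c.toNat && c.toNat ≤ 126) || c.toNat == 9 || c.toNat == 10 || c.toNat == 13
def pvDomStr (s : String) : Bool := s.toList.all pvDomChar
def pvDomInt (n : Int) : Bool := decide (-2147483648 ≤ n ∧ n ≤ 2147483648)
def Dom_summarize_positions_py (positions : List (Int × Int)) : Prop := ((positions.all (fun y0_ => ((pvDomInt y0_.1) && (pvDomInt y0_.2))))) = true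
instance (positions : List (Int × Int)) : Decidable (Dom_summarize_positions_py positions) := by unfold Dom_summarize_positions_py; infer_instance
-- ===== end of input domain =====

-- B replaces A's row-major grid scans by a set of occupied cells with prefix-sum tables for
-- the non-empty columns/rows, computes the bounding box in one fold, formats each rectangle
-- as it is found via a span helper, and filters leftovers with an all-not test; no speed claimed.

-- ===== PORT A =====
-- grid[r][c] read / write (indices come from ranges, always in bounds in A)
def pvCellA (g : List (List Int)) (r c : Nat) : Int := (g.getD r []).getD c 0

def pvSetCellA (g : List (List Int)) (r c : Nat) (v : Int) : List (List Int) :=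
  g.set r ((g.getD r []).set c v)

-- while j+width < cols and all(grid[i][j+width]==1 for i in range(i, rows)): width += 1
def pvGrowWA (g : List (List Int)) (rows cols i j : Nat) (w : Nat) : Nat → Nat
  | 0 => w
  | fuel+1 =>
    if j + w < cols && (List.range' i (rows - i)).all (fun r => pvCellA g r (j + w) == 1)
    then pvGrowWA g rows cols i j (w + 1) fuel else w

-- while i+height < rows and all(grid[i+height][j]==1 for j in range(j, j+width)): height += 1
def pvGrowHA (g : List (List Int)) (rows cols i j w : Nat) (h : Nat) : Nat → Nat
  | 0 => h
  | fuel+1 =>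
    if i + h < rows && (List.range' j w).all (fun c => pvCellA g (i + h) c == 1)
    then pvGrowHA g rows cols i j w (h + 1) fuel else h

-- find_largest_rectangle(grid)
def pvFindA (g : List (List Int)) : Nat × Nat × Nat × Nat :=
  if g.isEmpty || (g.getD 0 []).isEmpty then (0, 0, 0, 0) else
  let rows := g.length
  let cols := (g.getD 0 []).length
  ((List.range rows).foldl (fun st i =>
    (List.range cols).foldl (fun st j =>
      if pvCellA g i j == 1 then
        let w := pvGrowWA g rows cols i j 1 cols
        let h := pvGrowHA g rows cols i j w 1 rows
        if w * h > st.1 then (w * h, (j, i, w, h)) else st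
      else st) st) (0, (0, 0, 0, 0))).2

-- for i in range(y, y+height): for j in range(x, x+width): grid[i][j] = 0
def pvClearA (g : List (List Int)) (x y w h : Nat) : List (List Int) :=
  (List.range' y h).foldl (fun g i => (List.range' x w).foldl (fun g j => pvSetCellA g i j 0) g) g

-- while any(1 in row for row in grid): …  (fuel ≥ number of ones suffices)
def pvLoopA (g : List (List Int)) (minx miny : Int) (rects : List (Int × Int × Int × Int)) :
    Nat → List (Int × Int × Int × Int)
  | 0 => rects
  | fuel+1 =>
    if g.any (fun row => row.contains 1) then
      let r := pvFindA g
      pvLoopA (pvClearA g r.1 r.2.1 r.2.2.1 r.2.2.2) minx miny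
        (rects ++ [((r.1 : Int) + minx, (r.2.1 : Int) + miny, (r.2.2.1 : Int), (r.2.2.2 : Int))]) fuel
    else rects

def pvFmtA (r : Int × Int × Int × Int) : String :=
  if r.2.2.1 == 1 && r.2.2.2 == 1 then
    "(" ++ PySem.Int.toStr r.1 ++ ", " ++ PySem.Int.toStr r.2.1 ++ ")"
  else if r.2.2.1 == 1 then
    "(" ++ PySem.Int.toStr r.1 ++ ", " ++ PySem.Int.toStr r.2.1 ++ ":" ++ PySem.Int.toStr (r.2.1 + r.2.2.2) ++ ")"
  else if r.2.2.2 == 1 then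
    "(" ++ PySem.Int.toStr r.1 ++ ":" ++ PySem.Int.toStr (r.1 + r.2.2.1) ++ ", " ++ PySem.Int.toStr r.2.1 ++ ")"
  else
    "(" ++ PySem.Int.toStr r.1 ++ ":" ++ PySem.Int.toStr (r.1 + r.2.2.1) ++ ", " ++ PySem.Int.toStr r.2.1 ++ ":" ++ PySem.Int.toStr (r.2.1 + r.2.2.2) ++ ")"

def summarize_positions_py (positions : List (Int × Int)) : String :=
  if positions.isEmpty then "" else
  let min_x := (PySem.List.min? (positions.map (·.1)) (fun v => v)).getD 0
  let min_y := (PySem.List.min? (positions.map (·.2)) (fun v => v)).getD 0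
  let max_x := (PySem.List.max? (positions.map (·.1)) (fun v => v)).getD 0
  let max_y := (PySem.List.max? (positions.map (·.2)) (fun v => v)).getD 0
  let rows := (max_y - min_y + 1).toNat
  let cols := (max_x - min_x + 1).toNat
  let grid := positions.foldl
    (fun g p => pvSetCellA g (p.2 - min_y).toNat (p.1 - min_x).toNat 1)
    (List.replicate rows (List.replicate cols 0))
  let rects := pvLoopA grid min_x min_y [] positions.length
  let remaining := positions.filter (fun p =>
    ! rects.any (fun r => p.1 ≥ r.1 && p.1 < r.1 + r.2.2.1 && p.2 ≥ r.2.1 && p.2 < r.2.1 + r.2.2.2))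
  PySem.Str.join ", "
    (rects.map pvFmtA ++ remaining.map (fun p => "(" ++ PySem.Int.toStr p.1 ++ ", " ++ PySem.Int.toStr p.2 ++ ")"))

-- ===== PORT B =====
-- one pass over positions[1:]: the four independent bound updates
def pvBStep (b : Int × Int × Int × Int) (q : Int × Int) : Int × Int × Int × Int :=
  (if q.1 < b.1 then q.1 else b.1,
   if q.1 > b.2.1 then q.1 else b.2.1,
   if q.2 < b.2.2.1 then q.2 else b.2.2.1,
   if q.2 > b.2.2.2 then q.2 else b.2.2.2)

-- acc = [0]; for r in range(rows): acc.append(acc[-1] + ((j, r) in occ))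
def pvColPrefB (occ : PySem.Set (Int × Int)) (rows : Nat) (j : Int) : List Int :=
  (List.range rows).foldl
    (fun acc (r : Nat) => acc ++ [PySem.List.pyGetD acc (-1) 0 + (if (j, (r : Int)) ∈ occ then 1 else 0)]) [0]

def pvRowPrefB (occ : PySem.Set (Int × Int)) (cols : Nat) (i : Int) : List Int :=
  (List.range cols).foldl
    (fun acc (c : Nat) => acc ++ [PySem.List.pyGetD acc (-1) 0 + (if ((c : Int), i) ∈ occ then 1 else 0)]) [0]

-- cp = {j: col_prefix(j) for j in sorted({x for x, _ in occ})}
def pvCpB (occ : PySem.Set (Int × Int)) (rows : Nat) : PySem.Dict Int (List Int) :=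
  (PySem.List.sorted (PySem.Set.ofList (occ.map (fun p => p.1))) (fun v => v) false).foldl
    (fun d j => d.insert j (pvColPrefB occ rows j)) PySem.Dict.empty

-- rp = {i: row_prefix(i) for i in sorted({y for _, y in occ})}
def pvRpB (occ : PySem.Set (Int × Int)) (cols : Nat) : PySem.Dict Int (List Int) :=
  (PySem.List.sorted (PySem.Set.ofList (occ.map (fun p => p.2))) (fun v => v) false).foldl
    (fun d i => d.insert i (pvRowPrefB occ cols i)) PySem.Dict.empty

-- while j+width < cols and j+width in cp and cp[j+width][rows]-cp[j+width][i] == rows-i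
def pvGrowWB (cp : PySem.Dict Int (List Int)) (rows cols : Nat) (i j : Int) (w : Nat) : Nat → Nat
  | 0 => w
  | fuel+1 =>
    if j + (w : Int) < (cols : Int) && cp.contains (j + (w : Int)) &&
       (PySem.List.pyGetD (cp.getD (j + (w : Int)) []) (rows : Int) 0
          - PySem.List.pyGetD (cp.getD (j + (w : Int)) []) i 0 == (rows : Int) - i)
    then pvGrowWB cp rows cols i j (w + 1) fuel else w

-- while i+height < rows and i+height in rp and rp[i+height][j+width]-rp[i+height][j] == width
def pvGrowHB (rp : PySem.Dict Int (List Int)) (rows cols : Nat) (i j : Int) (w : Nat) (h : Nat) : Nat → Nat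
  | 0 => h
  | fuel+1 =>
    if i + (h : Int) < (rows : Int) && rp.contains (i + (h : Int)) &&
       (PySem.List.pyGetD (rp.getD (i + (h : Int)) []) (j + (w : Int)) 0
          - PySem.List.pyGetD (rp.getD (i + (h : Int)) []) j 0 == (w : Int))
    then pvGrowHB rp rows cols i j w (h + 1) fuel else h

-- for j, i in sorted(occ, key=lambda p: (p[1], p[0])): …
def pvFindB (occ : PySem.Set (Int × Int)) (rows cols : Nat) : Int × Int × Nat × Nat :=
  let cp := pvCpB occ rows
  let rp := pvRpB occ cols
  ((PySem.List.sorted2 occ (fun p => p.2) (fun p => p.1) false).foldl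
    (fun st p =>
      let w := pvGrowWB cp rows cols p.2 p.1 1 cols
      let h := pvGrowHB rp rows cols p.2 p.1 w 1 rows
      if w * h > st.1 then (w * h, (p.1, p.2, w, h)) else st)
    (0, ((0 : Int), (0 : Int), 0, 0))).2

-- occ.difference_update((c, r) for r in range(i, i+h) for c in range(j, j+w))
def pvRectCellsB (x y : Int) (w h : Nat) : List (Int × Int) :=
  (PySem.List.pyRange y (y + (h : Int)) 1).flatMap
    (fun i => (PySem.List.pyRange x (x + (w : Int)) 1).map (fun j => (j, i)))

-- span(a, n) = str(a) if n == 1 else f"{a}:{a+n}"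
def pvSpanB (a : Int) (n : Nat) : String :=
  if n == 1 then PySem.Int.toStr a
  else PySem.Int.toStr a ++ ":" ++ PySem.Int.toStr (a + (n : Int))

def pvFmtB (x y : Int) (w h : Nat) : String :=
  "(" ++ pvSpanB x w ++ ", " ++ pvSpanB y h ++ ")"

-- while occ: find, record the rectangle AND its formatted string, shrink occ
def pvLoopB (occ : PySem.Set (Int × Int)) (rows cols : Nat) (lox loy : Int)
    (rects : List (Int × Int × Nat × Nat)) (parts : List String) :
    Nat → List (Int × Int × Nat × Nat) × List String
  | 0 => (rects, parts)
  | fuel+1 =>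
    if occ.isEmpty then (rects, parts)
    else
      let r := pvFindB occ rows cols
      pvLoopB (PySem.Set.diff occ (pvRectCellsB r.1 r.2.1 r.2.2.1 r.2.2.2)) rows cols lox loy
        (rects ++ [(r.1 + lox, r.2.1 + loy, r.2.2.1, r.2.2.2)])
        (parts ++ [pvFmtB (r.1 + lox) (r.2.1 + loy) r.2.2.1 r.2.2.2]) fuel

def summarize_positions_py_alt (positions : List (Int × Int)) : String :=
  match positions with
  | [] => ""
  | p0 :: rest =>
    let b := rest.foldl pvBStep (p0.1, p0.1, p0.2, p0.2)
    let rows := (b.2.2.2 - b.2.2.1 + 1).toNat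
    let cols := (b.2.1 - b.1 + 1).toNat
    let occ := PySem.Set.ofList (positions.map (fun p => (p.1 - b.1, p.2 - b.2.2.1)))
    let rp := pvLoopB occ rows cols b.1 b.2.2.1 [] [] positions.length
    let leftovers := (positions.filter (fun p =>
        rp.1.all (fun r =>
          !(r.1 ≤ p.1 && p.1 < r.1 + (r.2.2.1 : Int) && r.2.1 ≤ p.2 && p.2 < r.2.1 + (r.2.2.2 : Int))))).map
      (fun p => "(" ++ PySem.Int.toStr p.1 ++ ", " ++ PySem.Int.toStr p.2 ++ ")")
    PySem.Str.join ", " (rp.2 ++ leftovers)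

-- ===== PRECONDITION & SPEC =====
def Spec_summarize_positions_py (positions : List (Int × Int)) (out : String) : Prop := out = summarize_positions_py_alt positions
instance (positions : List (Int × Int)) (out : String) : Decidable (Spec_summarize_positions_py positions out) := by unfold Spec_summarize_positions_py; infer_instance

-- ===== CLAIM (what is proved, stated in full; the proofs are below) =====
def Claim_equal_summarize_positions_py : Prop := ∀ (positions : List (Int × Int)), Dom_summarize_positions_py positions → Spec_summarize_positions_py positions (summarize_positions_py positions)

-- ===== LEMMAS AND PROOFS =====

-- B's rectangle tuple seen with A's Int components
def pvPhi (r : Int × Int × Nat × Nat) : Int × Int × Int × Int :=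
  (r.1, r.2.1, (r.2.2.1 : Int), (r.2.2.2 : Int))

def pvPsiFmt (r : Int × Int × Nat × Nat) : String := pvFmtB r.1 r.2.1 r.2.2.1 r.2.2.2

-- grid shape: `rows` rows, each of length `cols`
def pvShapes (g : List (List Int)) (rows cols : Nat) : Prop :=
  g.length = rows ∧ ∀ row ∈ g, row.length = cols

-- the A-grid / B-set correspondence maintained through the greedy loop
def pvInv (g : List (List Int)) (occ : List (Int × Int)) (rows cols : Nat) : Prop :=
  pvShapes g rows cols ∧
  (∀ p ∈ occ, 0 ≤ p.1 ∧ p.1 < (cols : Int) ∧ 0 ≤ p.2 ∧ p.2 < (rows : Int)) ∧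
  occ.Nodup ∧
  (∀ i j, i < rows → j < cols →
    pvCellA g i j = if ((j : Int), (i : Int)) ∈ occ then 1 else 0)

theorem pvRow_len (g : List (List Int)) (rows cols : Nat) (hs : pvShapes g rows cols)
    (i : Nat) (hi : i < rows) : (g.getD i []).length = cols := by
  obtain ⟨hlen, hrow⟩ := hs
  have hmem : g.getD i [] ∈ g := by
    rw [List.getD_eq_getElem _ _ (by omega)]
    exact List.getElem_mem (by omega)
  exact hrow _ hmem

theorem pvSetCellA_noop (g : List (List Int)) (r c : Nat) (v : Int) (h : g.length ≤ r) :
    pvSetCellA g r c v = g := by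
  unfold pvSetCellA
  rw [List.getD_eq_default _ _ h]
  simp [List.set_eq_of_length_le (by omega)]

theorem pvShapes_set (g : List (List Int)) (rows cols : Nat) (hs : pvShapes g rows cols)
    (r c : Nat) (v : Int) : pvShapes (pvSetCellA g r c v) rows cols := by
  obtain ⟨hlen, hrow⟩ := hs
  by_cases hr : r < g.length
  · refine ⟨by simpa [pvSetCellA] using hlen, ?_⟩
    intro row hmem
    rcases List.mem_or_eq_of_mem_set hmem with h | h
    · exact hrow _ h
    · subst h
      have hmemr : g.getD r [] ∈ g := by
        rw [List.getD_eq_getElem _ _ hr]; exact List.getElem_mem hr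
      simpa using hrow _ hmemr
  · rw [pvSetCellA_noop _ _ _ _ (by omega)]; exact ⟨hlen, hrow⟩

theorem pvCellA_set (g : List (List Int)) (r c : Nat) (v : Int) (r' c' : Nat)
    (hr' : r' < g.length) (hc' : c' < (g.getD r' []).length) :
    pvCellA (pvSetCellA g r c v) r' c' =
      if r' = r ∧ c' = c then v else pvCellA g r' c' := by
  simp only [pvCellA, pvSetCellA, List.getD_eq_getElem?_getD] at hc' ⊢
  by_cases hrr : r = r'
  · subst hrr
    rw [List.getElem?_set_self (by simpa using hr'), Option.getD_some, List.getElem?_set]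
    by_cases hcc : c = c'
    · subst hcc
      rw [if_pos rfl, if_pos hc', if_pos ⟨rfl, rfl⟩, Option.getD_some]
    · rw [if_neg hcc, if_neg (by tauto)]
  · rw [List.getElem?_set_ne hrr, if_neg (by tauto)]

theorem pvCellA_replicate (rows cols i j : Nat) :
    pvCellA (List.replicate rows (List.replicate cols (0 : Int))) i j = 0 := by
  simp only [pvCellA, List.getD_eq_getElem?_getD, List.getElem?_replicate]
  split_ifs <;> simp [List.getElem?_replicate] <;> split_ifs <;> simp

theorem pvShapes_replicate (rows cols : Nat) :
    pvShapes (List.replicate rows (List.replicate cols (0 : Int))) rows cols := by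
  refine ⟨by simp, ?_⟩
  intro row h
  simp [List.eq_of_mem_replicate h]

-- building the grid from the positions list = membership in the normalized list

theorem pvBuild (minx miny : Int) (rows cols : Nat) :
    ∀ (l : List (Int × Int)) (g : List (List Int)), pvShapes g rows cols →
    (∀ p ∈ l, minx ≤ p.1 ∧ p.1 - minx < (cols : Int) ∧ miny ≤ p.2 ∧ p.2 - miny < (rows : Int)) →
    pvShapes (l.foldl (fun g p => pvSetCellA g (p.2 - miny).toNat (p.1 - minx).toNat 1) g) rows cols ∧
    (∀ i j, i < rows → j < cols →
      pvCellA (l.foldl (fun g p => pvSetCellA g (p.2 - miny).toNat (p.1 - minx).toNat 1) g) i j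
        = if ((j : Int), (i : Int)) ∈ l.map (fun p => (p.1 - minx, p.2 - miny)) then 1
          else pvCellA g i j) := by
  intro l
  induction l with
  | nil => intro g hs _; simpa using hs
  | cons p t ih =>
    intro g hs hb
    have hp := hb p (by simp)
    have hs' : pvShapes (pvSetCellA g (p.2 - miny).toNat (p.1 - minx).toNat 1) rows cols :=
      pvShapes_set g rows cols hs _ _ _
    obtain ⟨ihs, ihc⟩ := ih _ hs' (fun q hq => hb q (by simp [hq]))
    refine ⟨by simpa using ihs, ?_⟩
    intro i j hi hj
    rw [List.foldl_cons, ihc i j hi hj,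
        pvCellA_set g _ _ _ i j (by have := hs.1; omega) (by rw [pvRow_len g rows cols hs i hi]; omega)]
    have hiff : (i = (p.2 - miny).toNat ∧ j = (p.1 - minx).toNat) ↔
        ((j : Int), (i : Int)) = (p.1 - minx, p.2 - miny) := by
      rw [Prod.ext_iff]
      constructor
      · rintro ⟨h1, h2⟩; constructor <;> simp <;> omega
      · rintro ⟨h1, h2⟩; simp at h1 h2; constructor <;> omega
    rw [List.map_cons]
    by_cases hmem : ((j : Int), (i : Int)) ∈ t.map (fun p => (p.1 - minx, p.2 - miny))
    · rw [if_pos hmem, if_pos (List.mem_cons_of_mem _ hmem)]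
    · rw [if_neg hmem]
      by_cases heq : ((j : Int), (i : Int)) = (p.1 - minx, p.2 - miny)
      · rw [if_pos (hiff.2 heq), if_pos (by simp [heq])]
      · rw [if_neg (fun h => heq (hiff.1 h)), if_neg (by simp [heq, hmem])]

theorem pvRangeSplit (i k : Nat) : List.range (i + k) = List.range i ++ List.range' i k := by
  induction k with
  | zero => simp
  | succ k ih =>
    rw [show i + (k+1) = (i+k)+1 by omega, List.range_succ, ih, List.range'_1_concat]
    simp

-- the prefix list built by `acc.append(acc[-1] + b r)` is the list of partial sums

theorem pvPref_spec (b : Nat → Int) : ∀ n,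
    (List.range n).foldl (fun acc r => acc ++ [PySem.List.pyGetD acc (-1) 0 + b r]) [0]
      = (List.range (n+1)).map (fun r => ((List.range r).map b).sum) := by
  intro n
  induction n with
  | zero => simp
  | succ n ih =>
    rw [List.range_succ, List.foldl_append, ih, List.foldl_cons, List.foldl_nil,
        List.range_succ (n := n+1), List.map_append]
    have hlast : PySem.List.pyGetD ((List.range (n+1)).map fun r => ((List.range r).map b).sum) (-1) 0
        = ((List.range n).map b).sum := by
      rw [List.range_succ, List.map_append]
      exact PySem.List.pyGetD_neg_one_append_singleton _ _ _
    rw [hlast]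
    congr 1
    simp [List.range_succ]

theorem pvCountAll (P : Nat → Prop) [DecidablePred P] (i n : Nat) (hin : i ≤ n) :
    ((((List.range n).countP (fun t => decide (P t))) : Int)
      - (((List.range i).countP (fun t => decide (P t))) : Int) = (n : Int) - (i : Int))
    ↔ ∀ t ∈ List.range' i (n - i), P t := by
  have hsplit : List.range n = List.range i ++ List.range' i (n - i) := by
    rw [← pvRangeSplit i (n - i), Nat.add_sub_cancel' hin]
  rw [hsplit, List.countP_append]
  have hle : (List.range' i (n - i)).countP (fun t => decide (P t)) ≤ n - i := by
    have := List.countP_le_length (l := List.range' i (n - i)) (p := fun t => decide (P t))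
    simpa using this
  have hlen : (List.range' i (n - i)).length = n - i := by simp
  constructor
  · intro h
    have hc : (List.range' i (n - i)).countP (fun t => decide (P t))
        = (List.range' i (n - i)).length := by omega
    intro t ht
    simpa using List.countP_eq_length.mp hc t ht
  · intro h
    have hc : (List.range' i (n - i)).countP (fun t => decide (P t)) = (List.range' i (n - i)).length :=
      List.countP_eq_length.mpr (fun t ht => by simpa using h t ht)
    omega

theorem pvGrowWA_le (g : List (List Int)) (rows cols i j : Nat) :
    ∀ fuel w, j + w ≤ cols → j + pvGrowWA g rows cols i j w fuel ≤ cols := by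
  intro fuel
  induction fuel with
  | zero => intro w h; simpa [pvGrowWA] using h
  | succ f ihf =>
    intro w h
    simp only [pvGrowWA]
    split
    · next hcond =>
      apply ihf
      have := hcond
      simp only [Bool.and_eq_true, decide_eq_true_eq] at this
      omega
    · exact h

theorem pvShapes_foldl_row (rows cols r0 : Nat) :
    ∀ (l : List Nat) (g : List (List Int)), pvShapes g rows cols →
      pvShapes (l.foldl (fun g j => pvSetCellA g r0 j 0) g) rows cols := by
  intro l
  induction l with
  | nil => intro g hs; simpa using hs
  | cons a t ih => intro g hs; exact ih _ (pvShapes_set g rows cols hs r0 a 0)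

theorem pvShapes_clear (rows cols x y w h : Nat) (g : List (List Int)) (hs : pvShapes g rows cols) :
    pvShapes (pvClearA g x y w h) rows cols := by
  unfold pvClearA
  have H : ∀ (l : List Nat) (g : List (List Int)), pvShapes g rows cols →
      pvShapes (l.foldl (fun g i => (List.range' x w).foldl (fun g j => pvSetCellA g i j 0) g) g) rows cols := by
    intro l
    induction l with
    | nil => intro g hs; simpa using hs
    | cons a t ih => intro g hs; exact ih _ (pvShapes_foldl_row rows cols a _ g hs)
  exact H _ g hs

theorem pvCellA_clearRow (rows cols r0 i j x : Nat) (hi : i < rows) (hj : j < cols) :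
    ∀ (w : Nat) (g : List (List Int)), pvShapes g rows cols →
    pvCellA ((List.range' x w).foldl (fun g j => pvSetCellA g r0 j 0) g) i j
      = if i = r0 ∧ x ≤ j ∧ j < x + w then 0 else pvCellA g i j := by
  intro w
  induction w with
  | zero => intro g _; rw [if_neg (by omega)]; rfl
  | succ w ih =>
    intro g hs
    have hs' : pvShapes ((List.range' x w).foldl (fun g j => pvSetCellA g r0 j 0) g) rows cols :=
      pvShapes_foldl_row rows cols r0 _ g hs
    rw [List.range'_1_concat, List.foldl_append, List.foldl_cons, List.foldl_nil,
        pvCellA_set _ _ _ _ i j (by have := hs'.1; omega)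
          (by rw [pvRow_len _ rows cols hs' i hi]; omega),
        ih g hs]
    split_ifs <;> first | rfl | omega

theorem pvCellA_clear (rows cols x y w i j : Nat) (hi : i < rows) (hj : j < cols) :
    ∀ (h : Nat) (g : List (List Int)), pvShapes g rows cols →
    pvCellA (pvClearA g x y w h) i j
      = if y ≤ i ∧ i < y + h ∧ x ≤ j ∧ j < x + w then 0 else pvCellA g i j := by
  intro h
  unfold pvClearA
  induction h with
  | zero => intro g _; rw [if_neg (by omega)]; rfl
  | succ h ih =>
    intro g hs
    have hs' : pvShapes ((List.range' y h).foldl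
        (fun g i => (List.range' x w).foldl (fun g j => pvSetCellA g i j 0) g) g) rows cols := by
      have H : ∀ (l : List Nat) (g : List (List Int)), pvShapes g rows cols →
          pvShapes (l.foldl (fun g i => (List.range' x w).foldl (fun g j => pvSetCellA g i j 0) g) g) rows cols := by
        intro l
        induction l with
        | nil => intro g hs; simpa using hs
        | cons a t ihl => intro g hs; exact ihl _ (pvShapes_foldl_row rows cols a _ g hs)
      exact H _ g hs
    rw [List.range'_1_concat, List.foldl_append, List.foldl_cons, List.foldl_nil,
        pvCellA_clearRow rows cols (y + h) i j x hi hj w _ hs',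
        ih g hs]
    split_ifs <;> first | rfl | omega

theorem pvAny_iff (g : List (List Int)) (occ : PySem.Set (Int × Int)) (rows cols : Nat)
    (hinv : pvInv g occ rows cols) :
    (g.any (fun row => row.contains 1)) = !occ.isEmpty := by
  obtain ⟨⟨hlen, hrow⟩, hb, _, hc⟩ := hinv
  rw [Bool.eq_iff_iff]
  simp only [List.any_eq_true, Bool.not_eq_eq_eq_not, Bool.not_true, List.isEmpty_eq_false_iff]
  constructor
  · rintro ⟨row, hmem, hcont⟩ hnil
    have h1 : (1 : Int) ∈ row := by simpa using hcont
    obtain ⟨i, hig, hieq⟩ := List.mem_iff_getElem.mp hmem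
    obtain ⟨j, hjr, hjeq⟩ := List.mem_iff_getElem.mp h1
    have hjc : j < cols := by
      have := hrow row hmem
      omega
    have hcell : pvCellA g i j = 1 := by
      unfold pvCellA
      rw [List.getD_eq_getElem _ _ hig, hieq, List.getD_eq_getElem _ _ hjr, hjeq]
    rw [hc i j (by omega) hjc] at hcell
    subst hnil
    simp at hcell
  · intro hnil
    obtain ⟨p, hp⟩ := List.exists_mem_of_ne_nil occ hnil
    obtain ⟨h1, h2, h3, h4⟩ := hb p hp
    have hi : p.2.toNat < rows := by omega
    have hj : p.1.toNat < cols := by omega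
    have hcast : ((p.1.toNat : Int), (p.2.toNat : Int)) = p := by
      rw [Prod.ext_iff]
      constructor <;> simp <;> omega
    have hcell : pvCellA g p.2.toNat p.1.toNat = 1 := by
      rw [hc p.2.toNat p.1.toNat hi hj, if_pos (by rw [hcast]; exact hp)]
    refine ⟨g.getD p.2.toNat [], ?_, ?_⟩
    · rw [List.getD_eq_getElem _ _ (by omega)]
      exact List.getElem_mem (by omega)
    · have hrl : (g.getD p.2.toNat []).length = cols := pvRow_len g rows cols ⟨hlen, hrow⟩ _ hi
      have : (1 : Int) ∈ g.getD p.2.toNat [] := by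
        unfold pvCellA at hcell
        rw [List.getD_eq_getElem _ _ (by omega : p.1.toNat < (g.getD p.2.toNat []).length)] at hcell
        rw [← hcell]
        exact List.getElem_mem (by omega)
      simpa using this

theorem pvColPrefB_getD (occ : PySem.Set (Int × Int)) (rows : Nat) (j : Int) (k : Nat)
    (hk : k ≤ rows) :
    (pvColPrefB occ rows j).getD k 0
      = (((List.range k).countP (fun (t : Nat) => decide ((j, (t : Int)) ∈ occ))) : Int) := by
  rw [pvColPrefB, pvPref_spec (fun r => if (j, (r : Int)) ∈ occ then 1 else 0) rows,
      PySem.List.getD_map_range _ _ _ _ (by omega)]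
  exact PySem.List.sum_map_ite_one_zero' (fun (t : Nat) => (j, (t : Int)) ∈ occ) (List.range k)

theorem pvRowPrefB_getD (occ : PySem.Set (Int × Int)) (cols : Nat) (i : Int) (k : Nat)
    (hk : k ≤ cols) :
    (pvRowPrefB occ cols i).getD k 0
      = (((List.range k).countP (fun (t : Nat) => decide (((t : Int), i) ∈ occ))) : Int) := by
  rw [pvRowPrefB, pvPref_spec (fun c => if ((c : Int), i) ∈ occ then 1 else 0) cols,
      PySem.List.getD_map_range _ _ _ _ (by omega)]
  exact PySem.List.sum_map_ite_one_zero' (fun (t : Nat) => ((t : Int), i) ∈ occ) (List.range k)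

-- lookups in a dict built from a nodup key list with key-determined values
theorem pvDictFold_getD (l : List Int) (hnd : l.Nodup) (v : Int → List Int) (k : Int)
    (hk : k ∈ l) :
    ((l.foldl (fun d j => d.insert j (v j)) PySem.Dict.empty).getD k []) = v k := by
  have hitems := PySem.Dict.items_foldl_insert_fresh l (fun a => a) v PySem.Dict.empty
    (fun a _ => PySem.Dict.contains_empty a) (by simpa using hnd)
  apply PySem.Dict.getD_of_mem_items
  · rw [hitems]
    exact List.mem_append.mpr (Or.inr (List.mem_map.mpr ⟨k, hk, rfl⟩))
  · exact PySem.Dict.nodup_keys_foldl_insert l _ _ PySem.Dict.nodup_keys_empty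

theorem pvDictFold_contains (l : List Int) (v : Int → List Int) (k : Int) :
    ((l.foldl (fun d j => d.insert j (v j)) PySem.Dict.empty).contains k) = true ↔ k ∈ l := by
  rw [PySem.Dict.contains_iff_mem_keys, PySem.Dict.keys_foldl_insert,
      PySem.Dict.keys_empty, PySem.Set.update_nil_left]
  exact PySem.Set.mem_ofList _ _

theorem pvSortedKeys_nodup (xs : List Int) :
    (PySem.List.sorted (PySem.Set.ofList xs) (fun v => v) false).Nodup :=
  (PySem.List.sorted_perm _ _ _).symm.nodup (PySem.Set.nodup_ofList xs)

theorem pvSortedKeys_mem (xs : List Int) (k : Int) :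
    k ∈ PySem.List.sorted (PySem.Set.ofList xs) (fun v => v) false ↔ k ∈ xs := by
  rw [(PySem.List.sorted_perm _ _ _).mem_iff]
  exact PySem.Set.mem_ofList _ _

theorem pvCpB_getD (occ : PySem.Set (Int × Int)) (rows : Nat) (j : Int)
    (hj : j ∈ occ.map (fun p => p.1)) :
    (pvCpB occ rows).getD j [] = pvColPrefB occ rows j :=
  pvDictFold_getD _ (pvSortedKeys_nodup _) _ _ ((pvSortedKeys_mem _ _).mpr hj)

theorem pvCpB_contains (occ : PySem.Set (Int × Int)) (rows : Nat) (j : Int) :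
    (pvCpB occ rows).contains j = true ↔ j ∈ occ.map (fun p => p.1) := by
  rw [pvCpB, pvDictFold_contains]
  exact pvSortedKeys_mem _ _

theorem pvRpB_getD (occ : PySem.Set (Int × Int)) (cols : Nat) (i : Int)
    (hi : i ∈ occ.map (fun p => p.2)) :
    (pvRpB occ cols).getD i [] = pvRowPrefB occ cols i :=
  pvDictFold_getD _ (pvSortedKeys_nodup _) _ _ ((pvSortedKeys_mem _ _).mpr hi)

theorem pvRpB_contains (occ : PySem.Set (Int × Int)) (cols : Nat) (i : Int) :
    (pvRpB occ cols).contains i = true ↔ i ∈ occ.map (fun p => p.2) := by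
  rw [pvRpB, pvDictFold_contains]
  exact pvSortedKeys_mem _ _

-- the row-major list of grid coordinates (proof-internal)
def pvPairs (R C : Nat) : List (Nat × Nat) :=
  (List.range R).flatMap (fun i => (List.range C).map (fun j => (i, j)))

theorem pvPairs_mem (R C : Nat) (p : Nat × Nat) : p ∈ pvPairs R C ↔ p.1 < R ∧ p.2 < C := by
  obtain ⟨i, j⟩ := p
  simp only [pvPairs, List.mem_flatMap, List.mem_map, List.mem_range, Prod.mk.injEq]
  constructor
  · rintro ⟨a, ha, b, hb, rfl, rfl⟩
    exact ⟨ha, hb⟩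
  · rintro ⟨h1, h2⟩
    exact ⟨i, h1, j, h2, rfl, rfl⟩

theorem pvPairs_pairwise (R C : Nat) :
    (pvPairs R C).Pairwise (fun p q => p.1 < q.1 ∨ (p.1 = q.1 ∧ p.2 < q.2)) := by
  rw [pvPairs, List.pairwise_flatMap]
  constructor
  · intro i _
    rw [List.pairwise_map]
    exact List.pairwise_lt_range.imp (fun h => Or.inr ⟨rfl, h⟩)
  · apply List.pairwise_lt_range.imp
    intro a b hab
    intro x hx y hy
    obtain ⟨j1, _, rfl⟩ := List.mem_map.mp hx
    obtain ⟨j2, _, rfl⟩ := List.mem_map.mp hy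
    exact Or.inl hab

theorem pvFoldlNested {σ : Type} (R C : Nat) (F : σ → Nat → Nat → σ) (init : σ) :
    (List.range R).foldl (fun st i => (List.range C).foldl (fun st j => F st i j) st) init
      = (pvPairs R C).foldl (fun st p => F st p.1 p.2) init := by
  rw [pvPairs, List.foldl_flatMap]
  congr 1
  funext st i
  rw [List.foldl_map]

-- Python's tuple key (p[1], p[0]) is the lexicographic order on (y, x)
theorem pvSorted2_eq (xs : List (Int × Int)) :
    PySem.List.sorted2 xs (fun p => p.2) (fun p => p.1) false
      = PySem.List.sorted xs (fun p => (toLex (p.2, p.1) : Lex (Int × Int))) false := by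
  rw [PySem.List.sorted_eq_foldl_insertBy]
  show List.foldl
      (fun acc x => PySem.List.insertBy
        (fun a b => decide (a.2 < b.2) || !decide (b.2 < a.2) && decide (a.1 < b.1)) x acc) [] xs
    = _
  have hfun : (fun (a b : Int × Int) => decide (a.2 < b.2) || !decide (b.2 < a.2) && decide (a.1 < b.1))
      = (fun (a b : Int × Int) =>
          decide ((toLex (a.2, a.1) : Lex (Int × Int)) < toLex (b.2, b.1))) := by
    funext a b
    rw [Bool.eq_iff_iff]
    simp only [Bool.or_eq_true, Bool.and_eq_true, Bool.not_eq_true', decide_eq_true_eq,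
      decide_eq_false_iff_not, Prod.Lex.lt_iff, ofLex_toLex]
    omega
  rw [hfun]

-- the row-major candidate scan of A visits exactly sorted(occ, key=(y, x)) of B
theorem pvSortedEq (occ : PySem.Set (Int × Int)) (rows cols : Nat)
    (hb : ∀ p ∈ occ, 0 ≤ p.1 ∧ p.1 < (cols : Int) ∧ 0 ≤ p.2 ∧ p.2 < (rows : Int))
    (hnd : occ.Nodup) :
    PySem.List.sorted2 occ (fun p => p.2) (fun p => p.1) false
      = ((pvPairs rows cols).filter
          (fun p => decide (((p.2 : Int), (p.1 : Int)) ∈ occ))).map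
          (fun p => ((p.2 : Int), (p.1 : Int))) := by
  rw [pvSorted2_eq]
  have hRpair : (((pvPairs rows cols).filter
      (fun p => decide (((p.2 : Int), (p.1 : Int)) ∈ occ))).map
      (fun p => ((p.2 : Int), (p.1 : Int)))).Pairwise
      (fun a b => (toLex (a.2, a.1) : Lex (Int × Int)) < toLex (b.2, b.1)) := by
    rw [List.pairwise_map]
    apply List.Pairwise.filter
    apply (pvPairs_pairwise rows cols).imp
    intro a b hab
    rw [Prod.Lex.lt_iff]
    simp only [ofLex_toLex]
    omega
  have hRnodup : (((pvPairs rows cols).filter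
      (fun p => decide (((p.2 : Int), (p.1 : Int)) ∈ occ))).map
      (fun p => ((p.2 : Int), (p.1 : Int)))).Nodup :=
    hRpair.imp (fun {a b} h hab => by subst hab; exact lt_irrefl _ h)
  have hLnodup : (PySem.List.sorted occ
      (fun p => (toLex (p.2, p.1) : Lex (Int × Int))) false).Nodup :=
    (PySem.List.sorted_perm _ _ _).symm.nodup hnd
  have hmem : ∀ z, z ∈ PySem.List.sorted occ
      (fun p => (toLex (p.2, p.1) : Lex (Int × Int))) false ↔
      z ∈ ((pvPairs rows cols).filter
        (fun p => decide (((p.2 : Int), (p.1 : Int)) ∈ occ))).map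
        (fun p => ((p.2 : Int), (p.1 : Int))) := by
    intro z
    rw [(PySem.List.sorted_perm _ _ _).mem_iff]
    constructor
    · intro hz
      obtain ⟨b1, b2, b3, b4⟩ := hb z hz
      refine List.mem_map.mpr ⟨(z.2.toNat, z.1.toNat), ?_, ?_⟩
      · rw [List.mem_filter]
        constructor
        · rw [pvPairs_mem]
          constructor <;> simp <;> omega
        · simp only [decide_eq_true_eq]
          have : (((z.1.toNat : Int)), ((z.2.toNat : Int))) = z := by
            rw [Prod.ext_iff]
            constructor <;> simp <;> omega
          rw [this]
          exact hz
      · rw [Prod.ext_iff]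
        constructor <;> simp <;> omega
    · intro hz
      obtain ⟨p, hpf, rfl⟩ := List.mem_map.mp hz
      have := (List.mem_filter.mp hpf).2
      simpa using this
  apply List.eq_of_perm_of_sorted
    (le := fun a b => (toLex (a.2, a.1) : Lex (Int × Int)) ≤ toLex (b.2, b.1))
  · intro a b _ _ h1 h2
    have hk : (toLex (a.2, a.1) : Lex (Int × Int)) = toLex (b.2, b.1) := le_antisymm h1 h2
    have := congrArg ofLex hk
    simp only [ofLex_toLex, Prod.mk.injEq] at this
    rw [Prod.ext_iff]
    exact ⟨this.2, this.1⟩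
  · exact PySem.List.sorted_pairwise occ _
  · exact hRpair.imp le_of_lt
  · exact (List.perm_ext_iff_of_nodup hLnodup hRnodup).mpr hmem

theorem pvColCond (g : List (List Int)) (occ : PySem.Set (Int × Int)) (rows cols : Nat)
    (hinv : pvInv g occ rows cols) (i c : Nat) (hi : i < rows) (hc : c < cols) :
    ((List.range' i (rows - i)).all (fun r => pvCellA g r c == 1))
      = ((pvCpB occ rows).contains (c : Int) &&
         (PySem.List.pyGetD ((pvCpB occ rows).getD (c : Int) []) (rows : Int) 0
            - PySem.List.pyGetD ((pvCpB occ rows).getD (c : Int) []) (i : Int) 0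
            == (rows : Int) - (i : Int))) := by
  by_cases hcm : (c : Int) ∈ occ.map (fun p => p.1)
  · have hcont : (pvCpB occ rows).contains (c : Int) = true := (pvCpB_contains occ rows _).mpr hcm
    rw [hcont, Bool.true_and, pvCpB_getD occ rows _ hcm,
        PySem.List.pyGetD_natCast, PySem.List.pyGetD_natCast,
        pvColPrefB_getD occ rows (c : Int) rows le_rfl,
        pvColPrefB_getD occ rows (c : Int) i (by omega)]
    rw [Bool.eq_iff_iff, List.all_eq_true, beq_iff_eq,
        pvCountAll (fun t => ((c : Int), (t : Int)) ∈ occ) i rows (by omega)]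
    constructor
    · intro h r hr
      have hmem := List.mem_range'_1.mp hr
      have h2 := h r hr
      rw [hinv.2.2.2 r c (by omega) hc] at h2
      by_cases hm : ((c : Int), (r : Int)) ∈ occ
      · exact hm
      · simp [hm] at h2
    · intro h r hr
      have hmem := List.mem_range'_1.mp hr
      rw [hinv.2.2.2 r c (by omega) hc, if_pos (h r hr)]
      decide
  · have hcont : (pvCpB occ rows).contains (c : Int) = false := by
      rw [Bool.eq_false_iff]
      intro h
      exact hcm ((pvCpB_contains occ rows _).mp h)
    rw [hcont, Bool.false_and, Bool.eq_iff_iff]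
    simp only [List.all_eq_true, Bool.false_eq_true, iff_false]
    intro hall
    have hrI : i ∈ List.range' i (rows - i) := List.mem_range'_1.mpr ⟨le_rfl, by omega⟩
    have h2 := hall i hrI
    rw [hinv.2.2.2 i c hi hc] at h2
    by_cases hm : ((c : Int), (i : Int)) ∈ occ
    · exact hcm (List.mem_map.mpr ⟨_, hm, rfl⟩)
    · simp [hm] at h2

theorem pvRowCond (g : List (List Int)) (occ : PySem.Set (Int × Int)) (rows cols : Nat)
    (hinv : pvInv g occ rows cols) (r0 j w : Nat) (hr0 : r0 < rows) (hw : 0 < w)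
    (hjw : j + w ≤ cols) :
    ((List.range' j w).all (fun c => pvCellA g r0 c == 1))
      = ((pvRpB occ cols).contains (r0 : Int) &&
         (PySem.List.pyGetD ((pvRpB occ cols).getD (r0 : Int) []) (((j + w : Nat)) : Int) 0
            - PySem.List.pyGetD ((pvRpB occ cols).getD (r0 : Int) []) (j : Int) 0
            == (w : Int))) := by
  by_cases hrm : (r0 : Int) ∈ occ.map (fun p => p.2)
  · have hcont : (pvRpB occ cols).contains (r0 : Int) = true := (pvRpB_contains occ cols _).mpr hrm
    rw [hcont, Bool.true_and, pvRpB_getD occ cols _ hrm,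
        PySem.List.pyGetD_natCast, PySem.List.pyGetD_natCast,
        pvRowPrefB_getD occ cols (r0 : Int) (j + w) hjw,
        pvRowPrefB_getD occ cols (r0 : Int) j (by omega)]
    rw [Bool.eq_iff_iff, List.all_eq_true, beq_iff_eq,
        show ((w : Nat) : Int) = ((j + w : Nat) : Int) - ((j : Nat) : Int) by push_cast; ring,
        pvCountAll (fun t => ((t : Int), (r0 : Int)) ∈ occ) j (j + w) (by omega),
        show (j + w) - j = w from by omega]
    constructor
    · intro h c hcm
      have hmem := List.mem_range'_1.mp hcm
      have h2 := h c hcm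
      rw [hinv.2.2.2 r0 c hr0 (by omega)] at h2
      by_cases hm : ((c : Int), (r0 : Int)) ∈ occ
      · exact hm
      · simp [hm] at h2
    · intro h c hcm
      have hmem := List.mem_range'_1.mp hcm
      rw [hinv.2.2.2 r0 c hr0 (by omega), if_pos (h c hcm)]
      decide
  · have hcont : (pvRpB occ cols).contains (r0 : Int) = false := by
      rw [Bool.eq_false_iff]
      intro h
      exact hrm ((pvRpB_contains occ cols _).mp h)
    rw [hcont, Bool.false_and, Bool.eq_iff_iff]
    simp only [List.all_eq_true, Bool.false_eq_true, iff_false]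
    intro hall
    have hjI : j ∈ List.range' j w := List.mem_range'_1.mpr ⟨le_rfl, by omega⟩
    have h2 := hall j hjI
    rw [hinv.2.2.2 r0 j hr0 (by omega)] at h2
    by_cases hm : ((j : Int), (r0 : Int)) ∈ occ
    · exact hrm (List.mem_map.mpr ⟨_, hm, rfl⟩)
    · simp [hm] at h2

theorem pvGrowWA_pos (g : List (List Int)) (rows cols i j : Nat) :
    ∀ fuel w, 0 < w → 0 < pvGrowWA g rows cols i j w fuel := by
  intro fuel
  induction fuel with
  | zero => intro w h; simpa [pvGrowWA] using h
  | succ f ihf =>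
    intro w h
    simp only [pvGrowWA]
    split
    · exact ihf (w + 1) (by omega)
    · exact h

theorem pvGrowW_eq (g : List (List Int)) (occ : PySem.Set (Int × Int)) (rows cols : Nat)
    (hinv : pvInv g occ rows cols) (i j : Nat) (hi : i < rows) :
    ∀ fuel w, pvGrowWA g rows cols i j w fuel
      = pvGrowWB (pvCpB occ rows) rows cols (i : Int) (j : Int) w fuel := by
  intro fuel
  induction fuel with
  | zero => intro w; rfl
  | succ f ihf =>
    intro w
    simp only [pvGrowWA, pvGrowWB]
    rw [show ((j : Int) + (w : Int)) = (((j + w : Nat)) : Int) by push_cast; ring,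
        show (decide ((((j + w : Nat)) : Int) < (cols : Int))) = decide (j + w < cols) by
          rw [decide_eq_decide]; omega]
    by_cases hlt : j + w < cols
    · rw [pvColCond g occ rows cols hinv i (j + w) hi hlt, ← Bool.and_assoc]
      split
      · exact ihf (w + 1)
      · rfl
    · have h1 : decide (j + w < cols) = false := by simp [hlt]
      rw [h1]
      simp

theorem pvGrowH_eq (g : List (List Int)) (occ : PySem.Set (Int × Int)) (rows cols : Nat)
    (hinv : pvInv g occ rows cols) (i j w : Nat) (hw : 0 < w) (hjw : j + w ≤ cols) :
    ∀ fuel h, pvGrowHA g rows cols i j w h fuel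
      = pvGrowHB (pvRpB occ cols) rows cols (i : Int) (j : Int) w h fuel := by
  intro fuel
  induction fuel with
  | zero => intro h; rfl
  | succ f ihf =>
    intro h
    simp only [pvGrowHA, pvGrowHB]
    rw [show ((i : Int) + (h : Int)) = (((i + h : Nat)) : Int) by push_cast; ring,
        show ((j : Int) + (w : Int)) = (((j + w : Nat)) : Int) by push_cast; ring,
        show (decide ((((i + h : Nat)) : Int) < (rows : Int))) = decide (i + h < rows) by
          rw [decide_eq_decide]; omega]
    by_cases hlt : i + h < rows
    · rw [pvRowCond g occ rows cols hinv (i + h) j w hlt hw hjw, ← Bool.and_assoc]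
      split
      · exact ihf (h + 1)
      · rfl
    · have h1 : decide (i + h < rows) = false := by simp [hlt]
      rw [h1]
      simp

def pvPsi (st : Nat × Nat × Nat × Nat × Nat) : Nat × Int × Int × Nat × Nat :=
  (st.1, (st.2.1 : Int), (st.2.2.1 : Int), st.2.2.2.1, st.2.2.2.2)

theorem pvFoldPsi (l : List (Nat × Nat))
    (F : (Nat × Nat × Nat × Nat × Nat) → Nat → Nat → (Nat × Nat × Nat × Nat × Nat))
    (G : (Nat × Int × Int × Nat × Nat) → (Int × Int) → (Nat × Int × Int × Nat × Nat))
    (hpt : ∀ st p, p ∈ l → G (pvPsi st) ((p.2 : Int), (p.1 : Int)) = pvPsi (F st p.1 p.2)) :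
    ∀ init, (l.map (fun p => ((p.2 : Int), (p.1 : Int)))).foldl G (pvPsi init)
      = pvPsi (l.foldl (fun st p => F st p.1 p.2) init) := by
  induction l with
  | nil => intro init; rfl
  | cons p t ih =>
    intro init
    rw [List.map_cons, List.foldl_cons, List.foldl_cons,
        hpt init p (by simp)]
    exact ih (fun st p hp => hpt st p (by simp [hp])) (F init p.1 p.2)

theorem pvFind_eq (g : List (List Int)) (occ : PySem.Set (Int × Int)) (rows cols : Nat)
    (hinv : pvInv g occ rows cols) (hr : 0 < rows) (hc : 0 < cols) :
    pvFindB occ rows cols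
      = (((pvFindA g).1 : Int), ((pvFindA g).2.1 : Int), (pvFindA g).2.2.1, (pvFindA g).2.2.2) := by
  have hlen : g.length = rows := hinv.1.1
  have hlen0 : (g.getD 0 []).length = cols := pvRow_len g rows cols hinv.1 0 hr
  have hne : g.isEmpty = false := by
    rw [List.isEmpty_eq_false_iff]
    intro h; rw [h] at hlen; simp at hlen; omega
  have hne2 : (g.getD 0 []).isEmpty = false := by
    rw [List.isEmpty_eq_false_iff]
    intro h; rw [h] at hlen0; simp at hlen0; omega
  have hAeq : pvFindA g
      = (((pvPairs rows cols).filter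
            (fun p => decide (((p.2 : Int), (p.1 : Int)) ∈ occ))).foldl
          (fun st p =>
            let w := pvGrowWA g rows cols p.1 p.2 1 cols
            let h := pvGrowHA g rows cols p.1 p.2 w 1 rows
            if w * h > st.1 then (w * h, (p.2, p.1, w, h)) else st)
          (0, (0, 0, 0, 0))).2 := by
    rw [pvFindA, hne, hne2]
    simp only [Bool.or_self, Bool.false_eq_true, if_false, hlen, hlen0]
    congr 1
    rw [pvFoldlNested rows cols (fun st i j =>
        if pvCellA g i j == 1 then
          let w := pvGrowWA g rows cols i j 1 cols
          let h := pvGrowHA g rows cols i j w 1 rows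
          if w * h > st.1 then (w * h, (j, i, w, h)) else st
        else st) (0, (0, 0, 0, 0))]
    rw [PySem.List.foldl_if_eq_foldl_filter (fun (p : Nat × Nat) => pvCellA g p.1 p.2 == 1)
        (fun st (p : Nat × Nat) =>
          let w := pvGrowWA g rows cols p.1 p.2 1 cols
          let h := pvGrowHA g rows cols p.1 p.2 w 1 rows
          if w * h > st.1 then (w * h, (p.2, p.1, w, h)) else st)]
    congr 1
    apply List.filter_congr
    intro p hp
    obtain ⟨h1, h2⟩ := (pvPairs_mem rows cols p).mp hp
    rw [hinv.2.2.2 p.1 p.2 h1 h2]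
    by_cases hm : ((p.2 : Int), (p.1 : Int)) ∈ occ <;> simp [hm]
  have hBeq : pvFindB occ rows cols
      = (pvPsi (((pvPairs rows cols).filter
            (fun p => decide (((p.2 : Int), (p.1 : Int)) ∈ occ))).foldl
          (fun st p =>
            let w := pvGrowWA g rows cols p.1 p.2 1 cols
            let h := pvGrowHA g rows cols p.1 p.2 w 1 rows
            if w * h > st.1 then (w * h, (p.2, p.1, w, h)) else st)
          (0, (0, 0, 0, 0)))).2 := by
    simp only [pvFindB]
    rw [pvSortedEq occ rows cols hinv.2.1 hinv.2.2.1]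
    congr 1
    exact pvFoldPsi _
      (fun st i j =>
        let w := pvGrowWA g rows cols i j 1 cols
        let h := pvGrowHA g rows cols i j w 1 rows
        if w * h > st.1 then (w * h, (j, i, w, h)) else st)
      _
      (by
        intro st p hp
        have hpp := (List.mem_filter.mp hp).1
        obtain ⟨i, j⟩ := p
        obtain ⟨hi, hj⟩ := (pvPairs_mem rows cols (i, j)).mp hpp
        simp only [← pvGrowW_eq g occ rows cols hinv i j hi cols, pvPsi]
        rw [← pvGrowH_eq g occ rows cols hinv i j _
              (pvGrowWA_pos g rows cols i j cols 1 (by omega))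
              (pvGrowWA_le g rows cols i j cols 1 (by omega)) rows 1]
        split_ifs <;> rfl)
      (0, (0, 0, 0, 0))
  rw [hAeq, hBeq]
  rfl

theorem pvRectCellsB_mem (x y : Int) (w h : Nat) (p : Int × Int) :
    p ∈ pvRectCellsB x y w h ↔
      x ≤ p.1 ∧ p.1 < x + (w : Int) ∧ y ≤ p.2 ∧ p.2 < y + (h : Int) := by
  unfold pvRectCellsB
  simp only [List.mem_flatMap, List.mem_map, PySem.List.mem_pyRange_one]
  constructor
  · rintro ⟨i, ⟨hi1, hi2⟩, j, ⟨hj1, hj2⟩, rfl⟩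
    exact ⟨hj1, hj2, hi1, hi2⟩
  · rintro ⟨h1, h2, h3, h4⟩
    exact ⟨p.2, ⟨h3, h4⟩, p.1, ⟨h1, h2⟩, rfl⟩

theorem pvInv_step (g : List (List Int)) (occ : PySem.Set (Int × Int)) (rows cols : Nat)
    (hinv : pvInv g occ rows cols) (x y w h : Nat) :
    pvInv (pvClearA g x y w h)
      (PySem.Set.diff occ (pvRectCellsB (x : Int) (y : Int) w h)) rows cols := by
  obtain ⟨hs, hb, hnd, hc⟩ := hinv
  refine ⟨pvShapes_clear rows cols x y w h g hs, ?_, PySem.Set.nodup_diff _ _ hnd, ?_⟩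
  · intro p hp
    exact hb p ((PySem.Set.mem_diff _ _ _).mp hp).1
  · intro i j hi hj
    rw [pvCellA_clear rows cols x y w i j hi hj h g hs]
    by_cases hrect : y ≤ i ∧ i < y + h ∧ x ≤ j ∧ j < x + w
    · rw [if_pos hrect, if_neg]
      intro hmem
      refine ((PySem.Set.mem_diff _ _ _).mp hmem).2
        ((pvRectCellsB_mem (x : Int) (y : Int) w h _).mpr ?_)
      refine ⟨by simp; omega, by simp; omega, by simp; omega, by simp; omega⟩
    · rw [if_neg hrect, hc i j hi hj]
      apply if_congr _ rfl rfl
      rw [PySem.Set.mem_diff]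
      constructor
      · intro hm
        refine ⟨hm, fun hr => hrect ?_⟩
        have := (pvRectCellsB_mem (x : Int) (y : Int) w h _).mp hr
        simp at this
        omega
      · exact fun hm => hm.1

-- one run of the two greedy loops: same rectangles, and B's parts are its rectangles formatted
theorem pvLoop_eq (rows cols : Nat) (minx miny : Int) (hr : 0 < rows) (hc : 0 < cols) :
    ∀ (fuel : Nat) (g : List (List Int)) (occ : PySem.Set (Int × Int))
      (rectsB : List (Int × Int × Nat × Nat)),
      pvInv g occ rows cols →
      pvLoopA g minx miny (rectsB.map pvPhi) fuel
        = ((pvLoopB occ rows cols minx miny rectsB (rectsB.map pvPsiFmt) fuel).1).map pvPhi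
      ∧ (pvLoopB occ rows cols minx miny rectsB (rectsB.map pvPsiFmt) fuel).2
        = ((pvLoopB occ rows cols minx miny rectsB (rectsB.map pvPsiFmt) fuel).1).map pvPsiFmt := by
  intro fuel
  induction fuel with
  | zero => intros; exact ⟨rfl, rfl⟩
  | succ f ih =>
    intro g occ rectsB hinv
    simp only [pvLoopA, pvLoopB]
    rw [pvAny_iff g occ rows cols hinv]
    by_cases hocc : occ.isEmpty
    · rw [hocc]; simp
    · have hocc' : occ.isEmpty = false := by simpa using hocc
      rw [hocc']
      simp only [Bool.not_false, if_true, Bool.false_eq_true, if_false]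
      rw [pvFind_eq g occ rows cols hinv hr hc]
      have hmapφ : rectsB.map pvPhi
            ++ [(((pvFindA g).1 : Int) + minx, ((pvFindA g).2.1 : Int) + miny,
                 ((pvFindA g).2.2.1 : Int), ((pvFindA g).2.2.2 : Int))]
          = (rectsB ++ [(((pvFindA g).1 : Int) + minx, ((pvFindA g).2.1 : Int) + miny,
                 (pvFindA g).2.2.1, (pvFindA g).2.2.2)]).map pvPhi := by
        rw [List.map_append]; rfl
      have hmapψ : rectsB.map pvPsiFmt
            ++ [pvFmtB (((pvFindA g).1 : Int) + minx) (((pvFindA g).2.1 : Int) + miny)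
                 (pvFindA g).2.2.1 (pvFindA g).2.2.2]
          = (rectsB ++ [(((pvFindA g).1 : Int) + minx, ((pvFindA g).2.1 : Int) + miny,
                 (pvFindA g).2.2.1, (pvFindA g).2.2.2)]).map pvPsiFmt := by
        rw [List.map_append]; rfl
      rw [hmapφ, hmapψ]
      exact ih _ _ _ (pvInv_step g occ rows cols hinv _ _ _ _)

-- the initial grid/set correspondence
theorem pvMainInv (positions : List (Int × Int)) (mnx mny mxx mxy : Int)
    (hmnx : ∀ p ∈ positions, mnx ≤ p.1) (hmxx : ∀ p ∈ positions, p.1 ≤ mxx)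
    (hmny : ∀ p ∈ positions, mny ≤ p.2) (hmxy : ∀ p ∈ positions, p.2 ≤ mxy) :
    pvInv (positions.foldl (fun g p => pvSetCellA g (p.2 - mny).toNat (p.1 - mnx).toNat 1)
        (List.replicate (mxy - mny + 1).toNat (List.replicate (mxx - mnx + 1).toNat 0)))
      (PySem.Set.ofList (positions.map (fun p => (p.1 - mnx, p.2 - mny))))
      (mxy - mny + 1).toNat (mxx - mnx + 1).toNat := by
  have hb : ∀ p ∈ positions, mnx ≤ p.1 ∧ p.1 - mnx < ((mxx - mnx + 1).toNat : Int)
      ∧ mny ≤ p.2 ∧ p.2 - mny < ((mxy - mny + 1).toNat : Int) := by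
    intro p hp
    have := hmnx p hp; have := hmxx p hp; have := hmny p hp; have := hmxy p hp
    omega
  obtain ⟨hshapes, hcell⟩ := pvBuild mnx mny (mxy - mny + 1).toNat (mxx - mnx + 1).toNat
    positions _ (pvShapes_replicate _ _) hb
  refine ⟨hshapes, ?_, PySem.Set.nodup_ofList _, ?_⟩
  · intro p hp
    have hp' : p ∈ positions.map (fun p => (p.1 - mnx, p.2 - mny)) :=
      (PySem.Set.mem_ofList _ _).mp hp
    obtain ⟨r, hr, rfl⟩ := List.mem_map.mp hp'
    obtain ⟨b1, b2, b3, b4⟩ := hb r hr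
    exact ⟨by omega, by omega, by omega, by omega⟩
  · intro i j hi hj
    rw [hcell i j hi hj, pvCellA_replicate]
    exact if_congr (by rw [PySem.Set.mem_ofList]) rfl rfl

-- the bound fold decomposes componentwise
theorem pvBFold_proj (l : List (Int × Int)) : ∀ (a : Int × Int × Int × Int),
    l.foldl pvBStep a
      = ((l.map (·.1)).foldl (fun m x => if x < m then x else m) a.1,
         (l.map (·.1)).foldl (fun m x => if x > m then x else m) a.2.1,
         (l.map (·.2)).foldl (fun m x => if x < m then x else m) a.2.2.1,
         (l.map (·.2)).foldl (fun m x => if x > m then x else m) a.2.2.2) := by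
  induction l with
  | nil => intro a; rfl
  | cons q t ih => intro a; rw [List.foldl_cons, ih]; rfl

theorem pvMinFold (xs : List Int) : ∀ (a : Int),
    (xs.foldl (fun m x => if x < m then x else m) a) ∈ a :: xs
    ∧ ∀ v ∈ a :: xs, xs.foldl (fun m x => if x < m then x else m) a ≤ v := by
  induction xs with
  | nil =>
    intro a
    refine ⟨List.mem_cons_self, ?_⟩
    intro v hv
    rcases List.mem_cons.mp hv with h | h
    · subst h; exact le_rfl
    · cases h
  | cons x t ih =>
    intro a
    obtain ⟨hmem, hle⟩ := ih (if x < a then x else a)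
    constructor
    · rw [List.foldl_cons]
      rcases List.mem_cons.mp hmem with h | h
      · rw [h]
        split_ifs
        · exact List.mem_cons_of_mem _ List.mem_cons_self
        · exact List.mem_cons_self
      · exact List.mem_cons_of_mem _ (List.mem_cons_of_mem _ h)
    · intro v hv
      rw [List.foldl_cons]
      have hfirst := hle _ List.mem_cons_self
      have hx_a : t.foldl (fun m x => if x < m then x else m) (if x < a then x else a) ≤ x
          ∧ t.foldl (fun m x => if x < m then x else m) (if x < a then x else a) ≤ a := by
        by_cases hxa : x < a
        · rw [if_pos hxa] at hfirst ⊢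
          exact ⟨hfirst, le_trans hfirst (le_of_lt hxa)⟩
        · rw [if_neg hxa] at hfirst ⊢
          exact ⟨le_trans hfirst (by omega), hfirst⟩
      rcases List.mem_cons.mp hv with h | h
      · subst h; exact hx_a.2
      · rcases List.mem_cons.mp h with h2 | h2
        · subst h2; exact hx_a.1
        · exact hle _ (List.mem_cons_of_mem _ h2)

theorem pvMaxFold (xs : List Int) : ∀ (a : Int),
    (xs.foldl (fun m x => if x > m then x else m) a) ∈ a :: xs
    ∧ ∀ v ∈ a :: xs, v ≤ xs.foldl (fun m x => if x > m then x else m) a := by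
  induction xs with
  | nil =>
    intro a
    refine ⟨List.mem_cons_self, ?_⟩
    intro v hv
    rcases List.mem_cons.mp hv with h | h
    · subst h; exact le_rfl
    · cases h
  | cons x t ih =>
    intro a
    obtain ⟨hmem, hle⟩ := ih (if x > a then x else a)
    constructor
    · rw [List.foldl_cons]
      rcases List.mem_cons.mp hmem with h | h
      · rw [h]
        split_ifs
        · exact List.mem_cons_of_mem _ List.mem_cons_self
        · exact List.mem_cons_self
      · exact List.mem_cons_of_mem _ (List.mem_cons_of_mem _ h)
    · intro v hv
      rw [List.foldl_cons]
      have hfirst := hle _ List.mem_cons_self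
      have hx_a : x ≤ t.foldl (fun m x => if x > m then x else m) (if x > a then x else a)
          ∧ a ≤ t.foldl (fun m x => if x > m then x else m) (if x > a then x else a) := by
        by_cases hxa : x > a
        · rw [if_pos hxa] at hfirst ⊢
          exact ⟨hfirst, le_trans (le_of_lt hxa) hfirst⟩
        · rw [if_neg hxa] at hfirst ⊢
          exact ⟨le_trans (by omega) hfirst, hfirst⟩
      rcases List.mem_cons.mp hv with h | h
      · subst h; exact hx_a.2
      · rcases List.mem_cons.mp h with h2 | h2
        · subst h2; exact hx_a.1
        · exact hle _ (List.mem_cons_of_mem _ h2)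

-- A's formatter on a cast rectangle is B's span-based formatter
theorem pvFmtAB (x y : Int) (w h : Nat) :
    pvFmtA (x, y, (w : Int), (h : Int)) = pvFmtB x y w h := by
  have hw : (((w : Int)) == 1) = (w == 1) := by
    rw [Bool.eq_iff_iff, beq_iff_eq, beq_iff_eq]; omega
  have hh : (((h : Int)) == 1) = (h == 1) := by
    rw [Bool.eq_iff_iff, beq_iff_eq, beq_iff_eq]; omega
  simp only [pvFmtA, pvFmtB, pvSpanB, hw, hh]
  by_cases h1 : w = 1 <;> by_cases h2 : h = 1 <;>
    simp [h1, h2, String.append_assoc]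

-- A's not-any-inside filter equals B's all-not-inside filter on the cast rectangles
theorem pvFilterEq (rectsB : List (Int × Int × Nat × Nat)) (p : Int × Int) :
    (! (rectsB.map pvPhi).any (fun r =>
         p.1 ≥ r.1 && p.1 < r.1 + r.2.2.1 && p.2 ≥ r.2.1 && p.2 < r.2.1 + r.2.2.2))
      = rectsB.all (fun r =>
         !(r.1 ≤ p.1 && p.1 < r.1 + (r.2.2.1 : Int) && r.2.1 ≤ p.2 && p.2 < r.2.1 + (r.2.2.2 : Int))) := by
  rw [List.any_map, List.all_eq_not_any_not]
  simp only [Bool.not_not]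
  rfl

-- ===== VERDICT (by name: the statement is the Claim_ definition above) =====
theorem summarize_positions_py_spec : Claim_equal_summarize_positions_py := by
  unfold Claim_equal_summarize_positions_py
  intro positions _hdom
  unfold Spec_summarize_positions_py
  cases positions with
  | nil => rfl
  | cons p0 rest =>
    have hne : (p0 :: rest : List (Int × Int)) ≠ [] := by simp
    have hnil : ((p0 :: rest : List (Int × Int)).isEmpty) = false := rfl
    rw [summarize_positions_py, if_neg (by simp)]
    show _ = summarize_positions_py_alt (p0 :: rest)
    rw [summarize_positions_py_alt]
    -- A's four extrema
    set xs := (p0 :: rest : List (Int × Int)) with hxs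
    obtain ⟨mnx, hmnx⟩ : ∃ v, PySem.List.min? (xs.map (·.1)) (fun v => v) = some v := by
      cases h : PySem.List.min? (xs.map (·.1)) (fun v => v) with
      | none => exact absurd ((PySem.List.min?_eq_none_iff _ _).mp h) (by simp [hxs])
      | some v => exact ⟨v, rfl⟩
    obtain ⟨mny, hmny⟩ : ∃ v, PySem.List.min? (xs.map (·.2)) (fun v => v) = some v := by
      cases h : PySem.List.min? (xs.map (·.2)) (fun v => v) with
      | none => exact absurd ((PySem.List.min?_eq_none_iff _ _).mp h) (by simp [hxs])
      | some v => exact ⟨v, rfl⟩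
    obtain ⟨mxx, hmxx⟩ : ∃ v, PySem.List.max? (xs.map (·.1)) (fun v => v) = some v := by
      cases h : PySem.List.max? (xs.map (·.1)) (fun v => v) with
      | none => exact absurd ((PySem.List.max?_eq_none_iff _ _).mp h) (by simp [hxs])
      | some v => exact ⟨v, rfl⟩
    obtain ⟨mxy, hmxy⟩ : ∃ v, PySem.List.max? (xs.map (·.2)) (fun v => v) = some v := by
      cases h : PySem.List.max? (xs.map (·.2)) (fun v => v) with
      | none => exact absurd ((PySem.List.max?_eq_none_iff _ _).mp h) (by simp [hxs])
      | some v => exact ⟨v, rfl⟩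
    -- B's fold computes the same four bounds
    have hfold := pvBFold_proj rest (p0.1, p0.1, p0.2, p0.2)
    have hxlist : xs.map (·.1) = p0.1 :: rest.map (·.1) := by simp [hxs]
    have hylist : xs.map (·.2) = p0.2 :: rest.map (·.2) := by simp [hxs]
    obtain ⟨hmn1, hmn2⟩ := pvMinFold (rest.map (·.1)) p0.1
    obtain ⟨hmx1, hmx2⟩ := pvMaxFold (rest.map (·.1)) p0.1
    obtain ⟨hmn1y, hmn2y⟩ := pvMinFold (rest.map (·.2)) p0.2
    obtain ⟨hmx1y, hmx2y⟩ := pvMaxFold (rest.map (·.2)) p0.2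
    have hmnx_mem : mnx ∈ xs.map (·.1) := PySem.List.min?_mem hmnx
    have hmxx_mem : mxx ∈ xs.map (·.1) := PySem.List.max?_mem hmxx
    have hmny_mem : mny ∈ xs.map (·.2) := PySem.List.min?_mem hmny
    have hmxy_mem : mxy ∈ xs.map (·.2) := PySem.List.max?_mem hmxy
    have hb1 : (rest.foldl pvBStep (p0.1, p0.1, p0.2, p0.2)).1 = mnx := by
      rw [hfold]
      refine le_antisymm (hmn2 _ (by rw [← hxlist]; exact hmnx_mem)) ?_
      exact PySem.List.min?_isMin hmnx _ (by rw [hxlist]; exact hmn1)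
    have hb2 : (rest.foldl pvBStep (p0.1, p0.1, p0.2, p0.2)).2.1 = mxx := by
      rw [hfold]
      refine le_antisymm ?_ (hmx2 _ (by rw [← hxlist]; exact hmxx_mem))
      exact PySem.List.max?_isMax hmxx _ (by rw [hxlist]; exact hmx1)
    have hb3 : (rest.foldl pvBStep (p0.1, p0.1, p0.2, p0.2)).2.2.1 = mny := by
      rw [hfold]
      refine le_antisymm (hmn2y _ (by rw [← hylist]; exact hmny_mem)) ?_
      exact PySem.List.min?_isMin hmny _ (by rw [hylist]; exact hmn1y)
    have hb4 : (rest.foldl pvBStep (p0.1, p0.1, p0.2, p0.2)).2.2.2 = mxy := by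
      rw [hfold]
      refine le_antisymm ?_ (hmx2y _ (by rw [← hylist]; exact hmxy_mem))
      exact PySem.List.max?_isMax hmxy _ (by rw [hylist]; exact hmx1y)
    -- bound facts
    have hLOx : ∀ p ∈ xs, mnx ≤ p.1 := fun p hp =>
      PySem.List.min?_isMin hmnx p.1 (List.mem_map.mpr ⟨p, hp, rfl⟩)
    have hHIx : ∀ p ∈ xs, p.1 ≤ mxx := fun p hp =>
      PySem.List.max?_isMax hmxx p.1 (List.mem_map.mpr ⟨p, hp, rfl⟩)
    have hLOy : ∀ p ∈ xs, mny ≤ p.2 := fun p hp =>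
      PySem.List.min?_isMin hmny p.2 (List.mem_map.mpr ⟨p, hp, rfl⟩)
    have hHIy : ∀ p ∈ xs, p.2 ≤ mxy := fun p hp =>
      PySem.List.max?_isMax hmxy p.2 (List.mem_map.mpr ⟨p, hp, rfl⟩)
    have hp0 : p0 ∈ xs := by simp [hxs]
    have hrpos : 0 < (mxy - mny + 1).toNat := by
      have := hLOy p0 hp0; have := hHIy p0 hp0; omega
    have hcpos : 0 < (mxx - mnx + 1).toNat := by
      have := hLOx p0 hp0; have := hHIx p0 hp0; omega
    -- run the two loops
    have hinv := pvMainInv xs mnx mny mxx mxy hLOx hHIx hLOy hHIy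
    have hloop := pvLoop_eq (mxy - mny + 1).toNat (mxx - mnx + 1).toNat mnx mny hrpos hcpos
      xs.length _ _ [] hinv
    simp only [List.map_nil] at hloop
    obtain ⟨hrects, hparts⟩ := hloop
    -- assemble
    simp only [hmnx, hmny, hmxx, hmxy, Option.getD_some, hb1, hb2, hb3, hb4]
    rw [hrects, hparts]
    congr 1
    congr 1
    · rw [List.map_map]
      apply List.map_congr_left
      intro r _
      show pvFmtA (pvPhi r) = pvPsiFmt r
      exact pvFmtAB r.1 r.2.1 r.2.2.1 r.2.2.2
    · congr 1
      apply List.filter_congr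
      intro p _
      exact pvFilterEq _ p
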